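-- pv_equiv track=rewrite | github.com/plargato/Euler | 131/solve.py | get_cubics
-- ===== SOURCE A (Python) =====
-- def get_cubics(max_diff):
--     cubics = [1]
--     v = 2
--     cubic = v * v * v
--     while cubic - cubics[-1] <= max_diff:
--         cubics.append(cubic)
--         v += 1
--         cubic = v * v * v
--     return cubics
-- ===== SOURCE B (Python) =====
-- def get_cubics(max_diff):
--     # Exponential + binary search for the largest index whose cube-gap
--     # 3*n*n - 3*n + 1 stays within max_diff; the first cube is always kept.
--     lo, hi = 1, 2
--     while 3 * hi * hi - 3 * hi + 1 <= max_diff: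
--         lo, hi = hi, hi * 2
--     while hi - lo > 1:
--         mid = (lo + hi) // 2
--         if 3 * mid * mid - 3 * mid + 1 <= max_diff:
--             lo = mid
--         else:
--             hi = mid
--     return [i * i * i for i in range(1, lo + 1)]
-- ===== Notes on version B (the rewrite author's own statement) =====
-- stated objective: alternative
-- what changed: Replaces the linear append-while-gap-small scan with an exponential-plus-binary search for the largest valid cube index n (gap condition 3n^2-3n+1 <= max_diff), then emits the cubes directly; both still build the n-element output.
import Mathlib
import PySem

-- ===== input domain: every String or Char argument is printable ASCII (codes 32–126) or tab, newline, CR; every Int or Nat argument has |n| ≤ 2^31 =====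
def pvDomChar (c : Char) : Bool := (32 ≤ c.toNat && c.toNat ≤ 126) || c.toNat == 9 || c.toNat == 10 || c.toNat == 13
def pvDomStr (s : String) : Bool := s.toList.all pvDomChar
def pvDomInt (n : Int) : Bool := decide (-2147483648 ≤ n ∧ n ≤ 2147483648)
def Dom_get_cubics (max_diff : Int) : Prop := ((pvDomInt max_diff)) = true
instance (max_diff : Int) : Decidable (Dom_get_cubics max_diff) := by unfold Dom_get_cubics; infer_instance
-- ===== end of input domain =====

-- B replaces A's linear scan by an exponential-plus-binary search for the last valid cube index.

-- ===== PORT A =====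
-- A's while loop; fuel bounds the iteration count (the loop runs while
-- 3v²-3v+1 ≤ max_diff, which forces v ≤ max_diff, so the fuel never runs out).
def getCubicsLoopA (fuel : Nat) (max_diff v : Int) (cubics : List Int) : List Int :=
  match fuel with
  | 0 => cubics
  | fuel + 1 =>
    -- cubics[-1]: cubics is never empty here (it starts as [1])
    if v * v * v - cubics.getLastD 0 ≤ max_diff then
      getCubicsLoopA fuel max_diff (v + 1) (cubics ++ [v * v * v])
    else cubics

def get_cubics (max_diff : Int) : List Int :=
  getCubicsLoopA (max_diff.toNat + 2) max_diff 2 [1]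

-- ===== PORT B =====
-- first while loop of Source B: double hi while gap(hi) ≤ max_diff (fuel never runs out)
def cubDouble (fuel : Nat) (max_diff lo hi : Int) : Int × Int :=
  match fuel with
  | 0 => (lo, hi)
  | fuel + 1 =>
    if 3 * hi * hi - 3 * hi + 1 ≤ max_diff then cubDouble fuel max_diff hi (hi * 2)
    else (lo, hi)

-- second while loop of Source B: bisect (fuel never runs out)
def cubBisect (fuel : Nat) (max_diff lo hi : Int) : Int × Int :=
  match fuel with
  | 0 => (lo, hi)
  | fuel + 1 =>
    if hi - lo > 1 then
      let mid := PySem.Int.floordiv (lo + hi) 2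
      if 3 * mid * mid - 3 * mid + 1 ≤ max_diff then cubBisect fuel max_diff mid hi
      else cubBisect fuel max_diff lo mid
    else (lo, hi)

def get_cubics_alt (max_diff : Int) : List Int :=
  let p := cubDouble (2 * max_diff.toNat + 64) max_diff 1 2
  let q := cubBisect (2 * max_diff.toNat + 64) max_diff p.1 p.2
  (PySem.List.pyRange 1 (q.1 + 1) 1).map (fun i => i * i * i)

-- ===== PRECONDITION & SPEC =====
def Spec_get_cubics (max_diff : Int) (out : List Int) : Prop := out = get_cubics_alt max_diff
instance (max_diff : Int) (out : List Int) : Decidable (Spec_get_cubics max_diff out) := by unfold Spec_get_cubics; infer_instance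

-- ===== CLAIM (what is proved, stated in full; the proofs are below) =====
def Claim_equal_get_cubics : Prop := ∀ (max_diff : Int), Dom_get_cubics max_diff → Spec_get_cubics max_diff (get_cubics max_diff)

-- ===== LEMMAS AND PROOFS =====

-- the gap between consecutive cubes
def cubGap (n : Int) : Int := 3 * n * n - 3 * n + 1

-- n is the last index kept: n ≥ 1, its gap fits (or n = 1), the next gap does not
def cubGood (m n : Int) : Prop :=
  1 ≤ n ∧ (n = 1 ∨ cubGap n ≤ m) ∧ m < cubGap (n + 1)

theorem le_cubGap (v : Int) : v ≤ cubGap v := by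
  unfold cubGap; nlinarith [sq_nonneg (v - 1), sq_nonneg v]

theorem cubGap_mono {a b : Int} (h1 : 1 ≤ a) (h2 : a ≤ b) : cubGap a ≤ cubGap b := by
  unfold cubGap; nlinarith

theorem cubDouble_spec (m : Int) : ∀ (fuel : Nat) (lo hi : Int),
    1 ≤ lo → lo < hi → (lo = 1 ∨ cubGap lo ≤ m) → (m + 1 - hi).toNat < fuel →
    ∃ lo' hi', cubDouble fuel m lo hi = (lo', hi') ∧
      1 ≤ lo' ∧ lo' < hi' ∧ (lo' = 1 ∨ cubGap lo' ≤ m) ∧ m < cubGap hi' ∧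
      (hi' = hi ∨ hi' ≤ 2 * m) := by
  intro fuel
  induction fuel with
  | zero => intro lo hi _ _ _ hf; omega
  | succ fuel ih =>
    intro lo hi hlo hlt hgood hf
    by_cases hc : cubGap hi ≤ m
    · have hhm : hi ≤ m := le_trans (le_cubGap hi) hc
      have := ih hi (hi * 2) (by omega) (by omega) (Or.inr hc) (by omega)
      obtain ⟨lo', hi', heq, h1, h2, h3, h4, h5⟩ := this
      refine ⟨lo', hi', ?_, h1, h2, h3, h4, by omega⟩
      simp only [cubDouble]
      rw [if_pos (show 3 * hi * hi - 3 * hi + 1 ≤ m from hc)]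
      exact heq
    · refine ⟨lo, hi, ?_, hlo, hlt, hgood, by omega, Or.inl rfl⟩
      simp only [cubDouble]
      rw [if_neg (show ¬ (3 * hi * hi - 3 * hi + 1 ≤ m) from hc)]

theorem cubBisect_spec (m : Int) : ∀ (fuel : Nat) (lo hi : Int),
    1 ≤ lo → lo < hi → (lo = 1 ∨ cubGap lo ≤ m) → m < cubGap hi → (hi - lo).toNat ≤ fuel →
    ∃ lo' hi', cubBisect fuel m lo hi = (lo', hi') ∧ cubGood m lo' := by
  intro fuel
  induction fuel with
  | zero => intro lo hi _ hlt _ _ hf; omega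
  | succ fuel ih =>
    intro lo hi hlo hlt hgood hhi hf
    by_cases hgt : hi - lo > 1
    · have hmid := PySem.Int.floordiv_two_mid_bounds (lo := lo) (hi := hi) (le_of_lt hlt)
      have hdv : PySem.Int.floordiv (lo + hi) 2 = (lo + hi) / 2 :=
        PySem.Int.floordiv_eq_ediv_of_pos (by omega)
      set mid := PySem.Int.floordiv (lo + hi) 2 with hmiddef
      have hmlo : lo < mid := by omega
      have hmhi : mid < hi := by omega
      by_cases hc : cubGap mid ≤ m
      · obtain ⟨lo', hi', heq, hg⟩ := ih mid hi (by omega) hmhi (Or.inr hc) hhi (by omega)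
        refine ⟨lo', hi', ?_, hg⟩
        simp only [cubBisect]
        rw [if_pos hgt, ← hmiddef, if_pos (show 3 * mid * mid - 3 * mid + 1 ≤ m from hc)]
        exact heq
      · obtain ⟨lo', hi', heq, hg⟩ := ih lo mid hlo hmlo hgood (by omega) (by omega)
        refine ⟨lo', hi', ?_, hg⟩
        simp only [cubBisect]
        rw [if_pos hgt, ← hmiddef, if_neg (show ¬ (3 * mid * mid - 3 * mid + 1 ≤ m) from hc)]
        exact heq
    · have : hi = lo + 1 := by omega
      refine ⟨lo, hi, ?_, hlo, hgood, by rw [← this]; exact hhi⟩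
      simp only [cubBisect]
      rw [if_neg hgt]

-- B computes the cubes 1..n for some n with cubGood m n (fuel suffices when m ≤ 2^31)
theorem alt_good (m : Int) (hm : m ≤ 2147483648) :
    ∃ n, cubGood m n ∧ get_cubics_alt m = (PySem.List.pyRange 1 (n + 1) 1).map (fun i => i * i * i) := by
  obtain ⟨lo1, hi1, he1, h1, h2, h3, h4, h5⟩ :=
    cubDouble_spec m (2 * m.toNat + 64) 1 2 (by omega) (by omega) (Or.inl rfl) (by omega)
  obtain ⟨lo2, hi2, he2, hg⟩ :=
    cubBisect_spec m (2 * m.toNat + 64) lo1 hi1 h1 h2 h3 h4 (by omega)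
  refine ⟨lo2, hg, ?_⟩
  simp only [get_cubics_alt, he1, he2]

-- A's loop appends exactly the cubes v..n (where n is the cubGood index)
theorem loopA_spec (m n : Int) (hg : cubGood m n) : ∀ (fuel : Nat) (v : Int) (acc : List Int),
    2 ≤ v → v ≤ n + 1 → acc.getLastD 0 = (v - 1) * (v - 1) * (v - 1) →
    (n + 1 - v).toNat < fuel →
    getCubicsLoopA fuel m v acc = acc ++ (PySem.List.pyRange v (n + 1) 1).map (fun i => i * i * i) := by
  obtain ⟨hn1, hng, hnext⟩ := hg
  intro fuel
  induction fuel with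
  | zero => intro v acc _ _ _ hf; omega
  | succ fuel ih =>
    intro v acc hv2 hvn hlast hf
    by_cases hvle : v ≤ n
    · have hgv : cubGap v ≤ m := by
        rcases hng with h | h
        · omega
        · exact le_trans (cubGap_mono (by omega) hvle) h
      have hcond : v * v * v - acc.getLastD 0 ≤ m := by
        rw [hlast]; unfold cubGap at hgv; nlinarith
      simp only [getCubicsLoopA]
      rw [if_pos hcond]
      rw [ih (v + 1) (acc ++ [v * v * v]) (by omega) (by omega)
        (by simp) (by omega)]
      rw [show PySem.List.pyRange v (n + 1) 1 = v :: PySem.List.pyRange (v + 1) (n + 1) 1 from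
        PySem.List.pyRange_one_cons (by omega)]
      simp
    · have hv : v = n + 1 := by omega
      have hcond : ¬ (v * v * v - acc.getLastD 0 ≤ m) := by
        rw [hlast, hv]
        unfold cubGap at hnext
        intro h; nlinarith
      simp only [getCubicsLoopA]
      rw [if_neg hcond, hv, PySem.List.pyRange_one_eq_nil (by omega)]
      simp

-- ===== VERDICT (by name: the statement is the Claim_ definition above) =====
theorem get_cubics_spec : Claim_equal_get_cubics := by
  intro m hdom
  have hm : m ≤ 2147483648 := by
    unfold Dom_get_cubics pvDomInt at hdom
    simp only [decide_eq_true_eq] at hdom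
    exact hdom.2
  obtain ⟨n, hg, halt⟩ := alt_good m hm
  have hnm : n ≤ m.toNat + 1 := by
    obtain ⟨h1, h2, _⟩ := hg
    rcases h2 with h | h
    · omega
    · have := le_trans (le_cubGap n) h; omega
  show get_cubics m = get_cubics_alt m
  rw [halt]
  unfold get_cubics
  rw [loopA_spec m n hg (m.toNat + 2) 2 [1] (by omega) (by
      obtain ⟨h1, _, _⟩ := hg; omega) (by norm_num) (by omega)]
  rw [PySem.List.pyRange_one_cons (show (1 : Int) < n + 1 by obtain ⟨h1, _, _⟩ := hg; omega)]
  simp
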